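-- pv_equiv track=rewrite | github.com/daniel-zeiler/potential-happiness | Stack/Solutions.py | is_valid_abc
-- ===== SOURCE A (Python) =====
-- def is_valid_abc(s: str) -> bool:
--     stack = []
--     for character in s:
--         stack.append(character)
--         while len(stack) >= 3 and stack[-3] + stack[-2] + stack[-1] == 'abc':
--             stack.pop()
--             stack.pop()
--             stack.pop()
--     return not stack
-- ===== SOURCE B (Python) =====
-- def is_valid_abc(s: str) -> bool:
--     while "abc" in s:
--         s = s.replace("abc", "")
--     return not s
-- ===== Notes on version B (the rewrite author's own statement) =====
-- stated objective: idiomatic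
-- what changed: Replaces the explicit character stack with a loop that repeatedly deletes every occurrence of the pattern via str.replace until none remains, then tests emptiness; correct because deletion of the non-self-overlapping word is confluent.
import Mathlib
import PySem

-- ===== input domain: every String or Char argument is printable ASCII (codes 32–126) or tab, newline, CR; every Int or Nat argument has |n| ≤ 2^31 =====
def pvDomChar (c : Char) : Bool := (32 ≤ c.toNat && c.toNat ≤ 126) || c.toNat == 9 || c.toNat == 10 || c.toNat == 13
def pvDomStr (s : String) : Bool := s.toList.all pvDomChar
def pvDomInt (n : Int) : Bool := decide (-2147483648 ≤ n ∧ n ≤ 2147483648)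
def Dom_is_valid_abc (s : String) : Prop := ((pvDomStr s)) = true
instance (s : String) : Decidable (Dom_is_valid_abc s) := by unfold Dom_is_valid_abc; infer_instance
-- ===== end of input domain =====

-- B replaces A's one-pass character stack by an idiomatic repeated global replace of "abc"
-- until none remains (equal because deleting the non-self-overlapping word "abc" is confluent).


-- ===== PORT A =====
-- the Python stack, kept with its TOP at the head (stack[-1] = head); popA is the inner
-- 'while len(stack) >= 3 and stack[-3]+stack[-2]+stack[-1] == "abc": pop; pop; pop'
def popA : List Char → List Char
  | 'c' :: 'b' :: 'a' :: rest => popA rest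
  | st => st

def is_valid_abc (s : String) : Bool :=
  (s.toList.foldl (fun st c => popA (c :: st)) []).isEmpty

-- ===== PORT B =====
-- rAbc is "s.replace('abc','')" specialised: a proof-friendly name for the same left-to-right
-- scan PySem.Chars.replace performs (replace_eq_rAbc below proves they coincide); the port's
-- loop body still CALLS PySem.Chars.replace, rAbc only serves the termination argument.
def rAbc : List Char → List Char
  | 'a' :: 'b' :: 'c' :: t => rAbc t
  | c :: t => c :: rAbc t
  | [] => []

theorem rAbc_length_le (l : List Char) : (rAbc l).length ≤ l.length := by
  fun_induction rAbc l with
  | case1 t ih => simp; omega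
  | case2 c t h ih => simp at *; omega
  | case3 => simp

theorem go_eq_rAbc (fuel : Nat) (l acc : List Char) (h : l.length ≤ fuel) :
    PySem.Chars.replace.go ['a','b','c'] [] fuel l acc = acc.reverse ++ rAbc l := by
  induction fuel generalizing l acc with
  | zero =>
    have : l = [] := by cases l <;> simp_all
    subst this; simp [PySem.Chars.replace.go, rAbc]
  | succ fuel ih =>
    match l with
    | [] => simp [PySem.Chars.replace.go, rAbc]
    | c :: t =>
      by_cases hp : List.isPrefixOf ['a','b','c'] (c :: t)
      · obtain ⟨t', ht⟩ : ∃ t', c :: t = 'a' :: 'b' :: 'c' :: t' := by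
          have := List.isPrefixOf_iff_prefix.mp hp
          obtain ⟨u, hu⟩ := this
          exact ⟨u, hu.symm⟩
        cases ht
        rw [PySem.Chars.replace.go]
        simp only [hp, if_true]
        have h' : t'.length ≤ fuel := by simp at h; omega
        rw [show List.drop (['a','b','c'] : List Char).length ('a'::'b'::'c'::t') = t' from rfl]
        rw [ih t' _ h']
        simp [rAbc]
      · rw [PySem.Chars.replace.go]
        simp only [hp]
        have h' : t.length ≤ fuel := by simp at h; omega
        rw [ih t (c :: acc) h']
        have hr : rAbc (c :: t) = c :: rAbc t := by
          rw [rAbc.eq_def]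
          split
          · rename_i t' heq; exfalso; apply hp
            injection heq with h1 h2
            subst h1; subst h2
            simp [List.isPrefixOf]
          · rename_i heq
            injection heq with h1 h2
            subst h1; subst h2; rfl
          · simp_all
        rw [hr]; simp

theorem replace_eq_rAbc (l : List Char) :
    PySem.Chars.replace l ['a','b','c'] [] = rAbc l := by
  rw [PySem.Chars.replace]
  simp only [List.isEmpty_iff]
  rw [if_neg (by simp)]
  exact go_eq_rAbc l.length l [] le_rfl

theorem rAbc_length_lt (l : List Char) (h : ['a','b','c'] <:+: l) :
    (rAbc l).length < l.length := by
  fun_induction rAbc l with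
  | case1 t ih =>
    have := rAbc_length_le t; simp; omega
  | case2 c t hne ih =>
    have ht : ['a','b','c'] <:+: t := by
      obtain ⟨s₁, s₂, hs⟩ := h
      cases s₁ with
      | nil =>
        exfalso
        injection hs with h1 h2
        exact hne s₂ h1.symm h2.symm
      | cons x s₁' =>
        injection hs with _ hs'
        exact ⟨s₁', s₂, hs'⟩
    have := ih ht
    simp at *; omega
  | case3 => simp at h

-- while "abc" in s: s = s.replace("abc", "")
def bLoop (l : List Char) : List Char :=
  if PySem.Chars.isIn ['a','b','c'] l then bLoop (PySem.Chars.replace l ['a','b','c'] []) else l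
  termination_by l.length
  decreasing_by
    rw [replace_eq_rAbc]
    exact rAbc_length_lt l ((PySem.Chars.isIn_iff_infix _ _).mp (by assumption))

def is_valid_abc_alt (s : String) : Bool := (bLoop s.toList).isEmpty

-- ===== PRECONDITION & SPEC =====
def Spec_is_valid_abc (s : String) (out : Bool) : Prop := out = is_valid_abc_alt s
instance (s : String) (out : Bool) : Decidable (Spec_is_valid_abc s out) := by unfold Spec_is_valid_abc; infer_instance

-- ===== CLAIM (what is proved, stated in full; the proofs are below) =====
def Claim_equal_is_valid_abc : Prop := ∀ (s : String), Dom_is_valid_abc s → Spec_is_valid_abc s (is_valid_abc s)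

-- ===== LEMMAS AND PROOFS =====

def runA (st l : List Char) : List Char := l.foldl (fun st c => popA (c :: st)) st

theorem popA_idem (st : List Char) : popA (popA st) = popA st := by
  fun_induction popA st with
  | case1 rest ih => exact ih
  | case2 st h => rw [popA.eq_def]; split <;> simp_all

theorem popA_cons_ne (c : Char) (st : List Char) (hc : c ≠ 'c') : popA (c :: st) = c :: st := by
  rw [popA.eq_def]; split <;> simp_all

theorem runA_cons (st : List Char) (c : Char) (l : List Char) :
    runA st (c :: l) = runA (popA (c :: st)) l := rfl

theorem runA_abc (st : List Char) (h : popA st = st) (v : List Char) :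
    runA st ('a' :: 'b' :: 'c' :: v) = runA st v := by
  rw [runA_cons, popA_cons_ne 'a' st (by decide)]
  rw [runA_cons, popA_cons_ne 'b' _ (by decide)]
  rw [runA_cons]
  have : popA ('c' :: 'b' :: 'a' :: st) = st := by rw [popA]; exact h
  rw [this]

theorem runA_rAbc (l : List Char) (st : List Char) (h : popA st = st) :
    runA st (rAbc l) = runA st l := by
  fun_induction rAbc l generalizing st with
  | case1 t ih => rw [runA_abc st h t, ih st h]
  | case2 c t hne ih =>
    rw [runA_cons, runA_cons, ih (popA (c :: st)) (popA_idem _)]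
  | case3 => rfl

theorem runA_noAbc (r u : List Char) (h : ¬ ['a','b','c'] <:+: (u ++ r)) :
    runA u.reverse r = (u ++ r).reverse := by
  induction r generalizing u with
  | nil => simp [runA]
  | cons c t ih =>
    rw [runA_cons]
    have hnp : popA (c :: u.reverse) = c :: u.reverse := by
      rw [popA.eq_def]; split
      · rename_i rest heq
        exfalso; apply h
        injection heq with h1 h2
        have hu : u = rest.reverse ++ ['a','b'] := by
          have := congrArg List.reverse h2
          simpa using this
        subst h1
        rw [hu]
        exact ⟨rest.reverse, t, by simp⟩
      · rfl
    rw [hnp]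
    have : c :: u.reverse = (u ++ [c]).reverse := by simp
    rw [this, ih (u ++ [c]) (by simpa using h)]
    simp

theorem bLoop_run (l : List Char) :
    runA [] (bLoop l) = runA [] l ∧ ¬ ['a','b','c'] <:+: (bLoop l) := by
  fun_induction bLoop l with
  | case1 l hin ih =>
    refine ⟨?_, ih.2⟩
    rw [ih.1, replace_eq_rAbc, runA_rAbc l [] rfl]
  | case2 l hin =>
    exact ⟨rfl, by simpa using (PySem.Chars.isIn_eq_false_iff _ _).mp (by simpa using hin)⟩

-- ===== VERDICT (by name: the statement is the Claim_ definition above) =====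
theorem is_valid_abc_spec : Claim_equal_is_valid_abc := by
  intro s _
  unfold Spec_is_valid_abc is_valid_abc is_valid_abc_alt
  obtain ⟨h1, h2⟩ := bLoop_run s.toList
  have h3 : runA [] (bLoop s.toList) = (bLoop s.toList).reverse := by
    have := runA_noAbc (bLoop s.toList) [] (by simpa using h2)
    simpa using this
  have : (s.toList.foldl (fun st c => popA (c :: st)) []) = (bLoop s.toList).reverse := by
    rw [show (s.toList.foldl (fun st c => popA (c :: st)) []) = runA [] s.toList from rfl,
        ← h1, h3]
  rw [this]
  simp
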